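-- pv_equiv track=rewrite | github.com/exastro-suite/exastro-it-automation | ita_root/common_libs/ansible_driver/classes/CreateAnsibleExecFiles.py | DeleteUnuseData
-- ===== SOURCE A (Python) =====
-- def DeleteUnuseData(srcData, chkList):
--     '''
--     辞書型配列から不要なデータを削除
--     Arguments:
--         srcData: 辞書型配列
--         {ロール名: {ファイル名: {行番号: {変数名: 0},,,,}}}
--         chkList: 辞書に必要なキーリスト
--                 ['role1', 'role2']
--     Returns:
--         srcData
--     '''
--     for roleName in list(srcData.keys()):
--         useFlag = False
--         for useRoleName in chkList:
--             if roleName == useRoleName: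
--                 useFlag = True
--                 break
--         if useFlag is False:
--             del srcData[roleName]
--     return srcData
-- ===== SOURCE B (Python) =====
-- def DeleteUnuseData(srcData, chkList):
--     keep = set(chkList)
--     kept = [(k, v) for k, v in srcData.items() if k in keep]
--     srcData.clear()
--     srcData.update(kept)
--     return srcData
-- ===== Notes on version B (the rewrite author's own statement) =====
-- stated objective: idiomatic
-- what changed: B works in the opposite direction: instead of scanning chkList per key and deleting unwanted keys in place, it builds the list of entries to KEEP in one filtered pass against a set, then clears the dict and refills it with those entries (same object, same final in-place state).
import Mathlib
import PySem

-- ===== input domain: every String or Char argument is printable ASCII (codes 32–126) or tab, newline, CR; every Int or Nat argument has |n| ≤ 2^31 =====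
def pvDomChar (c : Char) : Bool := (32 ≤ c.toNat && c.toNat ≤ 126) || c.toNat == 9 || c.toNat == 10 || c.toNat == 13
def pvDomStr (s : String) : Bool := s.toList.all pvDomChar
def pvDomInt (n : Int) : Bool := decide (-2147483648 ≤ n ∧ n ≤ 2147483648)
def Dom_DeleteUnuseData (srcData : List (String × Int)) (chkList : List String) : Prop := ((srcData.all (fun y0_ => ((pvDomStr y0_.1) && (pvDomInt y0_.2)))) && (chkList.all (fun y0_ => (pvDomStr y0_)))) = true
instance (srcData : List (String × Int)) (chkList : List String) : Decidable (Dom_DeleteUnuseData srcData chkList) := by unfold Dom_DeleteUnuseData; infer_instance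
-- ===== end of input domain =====

-- ===== PORT A =====
-- B builds the entries to KEEP in one filtered pass and refills the dict, instead of A's delete loop
-- with an inner membership scan; return-value equivalence only (both Pythons leave srcData in the same
-- final in-place state: exactly the entries whose key is in chkList, in original order).

-- inner 'for useRoleName in chkList: if roleName == useRoleName: useFlag = True; break'
def DUD_useFlag (roleName : String) : List String → Bool
  | [] => false
  | u :: rest => if roleName == u then true else DUD_useFlag roleName rest

def DeleteUnuseData (srcData : List (String × Int)) (chkList : List String) : List (String × Int) :=
  let d0 : PySem.Dict String Int := ⟨srcData⟩
  ((PySem.Dict.keys d0).foldl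
    (fun d roleName =>
      let useFlag := DUD_useFlag roleName chkList
      if useFlag = false then PySem.Dict.erase d roleName else d) d0).items

-- ===== PORT B =====
def DeleteUnuseData_alt (srcData : List (String × Int)) (chkList : List String) : List (String × Int) :=
  let d0 : PySem.Dict String Int := ⟨srcData⟩
  let keep := PySem.Set.ofList chkList
  let kept := d0.items.filter (fun p => PySem.Set.contains keep p.1)
  -- srcData.clear(); srcData.update(kept)
  (PySem.Dict.update PySem.Dict.empty kept).items

-- ===== PRECONDITION & SPEC =====
-- Pre_ excludes association lists with duplicate keys: these do not represent a Python dict (the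
-- function's srcData argument), so no Python input is excluded.
def Pre_DeleteUnuseData (srcData : List (String × Int)) (chkList : List String) : Prop :=
  (srcData.map Prod.fst).Nodup
instance (srcData : List (String × Int)) (chkList : List String) : Decidable (Pre_DeleteUnuseData srcData chkList) := by unfold Pre_DeleteUnuseData; infer_instance
def pvWitness_DeleteUnuseData : (List (String × Int)) × List String := ([("role1", 1), ("role2", 2)], ["role1"])

def Spec_DeleteUnuseData (srcData : List (String × Int)) (chkList : List String) (out : List (String × Int)) : Prop := out = DeleteUnuseData_alt srcData chkList
instance (srcData : List (String × Int)) (chkList : List String) (out : List (String × Int)) : Decidable (Spec_DeleteUnuseData srcData chkList out) := by unfold Spec_DeleteUnuseData; infer_instance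

-- ===== CLAIM (what is proved, stated in full; the proofs are below) =====
def Claim_equal_DeleteUnuseData : Prop := ∀ (srcData : List (String × Int)) (chkList : List String), Dom_DeleteUnuseData srcData chkList → Pre_DeleteUnuseData srcData chkList → Spec_DeleteUnuseData srcData chkList (DeleteUnuseData srcData chkList)

-- ===== LEMMAS AND PROOFS =====

theorem DUD_useFlag_eq_contains (r : String) (l : List String) :
    DUD_useFlag r l = l.contains r := by
  induction l with
  | nil => rfl
  | cons u rest ih =>
      by_cases h : r = u
      · simp [DUD_useFlag, h]
      · simp [DUD_useFlag, h, ih]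

theorem foldl_eraseIf (c : String → Bool) (ks : List String) (d : List (String × Int)) :
    ((ks.foldl (fun d k => if c k = false then PySem.Dict.erase d k else d)
        (⟨d⟩ : PySem.Dict String Int)).items)
      = d.filter (fun p => c p.1 || !ks.contains p.1) := by
  induction ks generalizing d with
  | nil => simp
  | cons k rest ih =>
      simp only [List.foldl_cons]
      by_cases h : c k = false
      · rw [if_pos h]
        rw [show (PySem.Dict.erase (⟨d⟩ : PySem.Dict String Int) k)
              = (⟨d.filter (fun p => !(p.1 == k))⟩ : PySem.Dict String Int) from rfl]
        rw [ih, List.filter_filter]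
        apply List.filter_congr
        intro p _
        by_cases hk : p.1 = k <;> simp_all
      · rw [if_neg h]
        rw [ih]
        apply List.filter_congr
        intro p _
        by_cases hk : p.1 = k <;> simp_all

-- B's clear-then-update pass rebuilds exactly the kept list (keys are fresh and distinct).
theorem update_empty_items (l : List (String × Int)) (h : (l.map Prod.fst).Nodup) :
    (PySem.Dict.update (PySem.Dict.empty : PySem.Dict String Int) l).items = l := by
  have := PySem.Dict.items_foldl_insert_fresh l Prod.fst Prod.snd
      (PySem.Dict.empty : PySem.Dict String Int)
      (by intro a _; simp [PySem.Dict.contains_empty]) h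
  simpa [PySem.Dict.update] using this

-- ===== VERDICT (by name: the statement is the Claim_ definition above) =====
theorem DeleteUnuseData_spec : Claim_equal_DeleteUnuseData := by
  intro srcData chkList _ hpre
  unfold Spec_DeleteUnuseData DeleteUnuseData DeleteUnuseData_alt
  simp only
  rw [foldl_eraseIf]
  rw [update_empty_items _ (hpre.sublist (List.Sublist.map Prod.fst List.filter_sublist))]
  apply List.filter_congr
  intro p hp
  have hmem : p.1 ∈ (srcData.map Prod.fst) := List.mem_map_of_mem hp
  simp only [DUD_useFlag_eq_contains]
  by_cases hc : p.1 ∈ chkList <;>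
    simp_all [PySem.Set.contains, PySem.Set.mem_ofList, PySem.Dict.keys]
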